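-- pv_equiv track=rewrite | github.com/aswathych/nobody1 | secret.py | split_in_parts
-- ===== SOURCE A (Python) =====
-- def split_in_parts(sentence):
--     """Split the string into a list of lists (either containing letters, or just
--     one character not part of the alphabet).
--
--     Example:
--
--         >>> split_in_parts("this is.")
--         [['t', 'h', 'i', 's'], [' '], ['i', 's'], ['.']]
--
--     """
--     sentence_list = []
--     sublist = []
--     for char in sentence:
--         if ord('A') <= ord(char) <= ord('z'):
--             sublist.append(char)
--         else:
--             if sublist:
--                 sentence_list.append(sublist)
--                 sublist = []
--             sentence_list.append([char])
--     if sublist: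
--         sentence_list.append(sublist)
--     return sentence_list
-- ===== SOURCE B (Python) =====
-- def split_in_parts(sentence):
--     out = []
--     i = 0
--     n = len(sentence)
--     while i < n:
--         if 'A' <= sentence[i] <= 'z':
--             j = i
--             while j < n and 'A' <= sentence[j] <= 'z':
--                 j += 1
--             out.append(list(sentence[i:j]))
--             i = j
--         else:
--             out.append([sentence[i]])
--             i += 1
--     return out
-- ===== Notes on version B (the rewrite author's own statement) =====
-- stated objective: alternative
-- what changed: Replaces A's stateful accumulator loop (pending sublist flushed on non-letters and at the end) with an index-based scan that emits each maximal letter-run in one inner advance and needs no pending state or final flush.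
import Mathlib
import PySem

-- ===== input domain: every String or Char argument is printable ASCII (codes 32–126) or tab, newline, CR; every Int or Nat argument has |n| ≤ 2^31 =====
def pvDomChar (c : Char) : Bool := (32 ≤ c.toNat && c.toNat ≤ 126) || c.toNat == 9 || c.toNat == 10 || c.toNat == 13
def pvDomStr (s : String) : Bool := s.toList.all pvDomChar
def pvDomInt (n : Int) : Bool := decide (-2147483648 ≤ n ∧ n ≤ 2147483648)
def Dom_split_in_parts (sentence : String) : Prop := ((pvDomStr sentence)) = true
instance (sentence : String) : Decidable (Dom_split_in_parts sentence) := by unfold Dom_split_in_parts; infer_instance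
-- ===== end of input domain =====

-- B replaces A's pending-sublist accumulator loop by a scan emitting each maximal letter-run directly (alternative decomposition, same cost).

-- ===== PORT A =====
-- ord('A') <= ord(char) <= ord('z')
def pvIsLet (c : Char) : Bool := 65 ≤ c.toNat && c.toNat ≤ 122

def pvS (c : Char) : String := String.ofList [c]

-- one iteration of A's for-loop; state = (sentence_list, sublist)
def pvAStep (acc : List (List String) × List String) (c : Char) :
    List (List String) × List String :=
  if pvIsLet c then
    (acc.1, acc.2 ++ [pvS c])
  else
    let acc' := if acc.2.isEmpty then acc else (acc.1 ++ [acc.2], [])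
    (acc'.1 ++ [[pvS c]], [])

def split_in_parts (sentence : String) : List (List String) :=
  let r := sentence.toList.foldl pvAStep ([], [])
  if r.2.isEmpty then r.1 else r.1 ++ [r.2]

-- ===== PORT B =====
-- B's outer while: letter head → take the maximal letter run (the inner j-advance), else a singleton
def pvBGo : List Char → List (List String)
  | [] => []
  | c :: cs =>
    if pvIsLet c then
      ((c :: cs).takeWhile pvIsLet).map pvS :: pvBGo ((c :: cs).dropWhile pvIsLet)
    else
      [pvS c] :: pvBGo cs
  termination_by l => l.length
  decreasing_by
    · simp only [List.dropWhile, *]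
      exact Nat.lt_succ_of_le (List.length_dropWhile_le _ _)
    · simp

def split_in_parts_alt (sentence : String) : List (List String) :=
  pvBGo sentence.toList

-- ===== PRECONDITION & SPEC =====
def Spec_split_in_parts (sentence : String) (out : List (List String)) : Prop := out = split_in_parts_alt sentence
instance (sentence : String) (out : List (List String)) : Decidable (Spec_split_in_parts sentence out) := by unfold Spec_split_in_parts; infer_instance

-- ===== CLAIM (what is proved, stated in full; the proofs are below) =====
def Claim_equal_split_in_parts : Prop := ∀ (sentence : String), Dom_split_in_parts sentence → Spec_split_in_parts sentence (split_in_parts sentence)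

-- ===== LEMMAS AND PROOFS =====

-- B's output with a pending (already-read) letter prefix `sub` still to be attached
def pvPref (sub : List String) (cs : List Char) : List (List String) :=
  match cs with
  | [] => if sub.isEmpty then [] else [sub]
  | c :: cs' =>
    if pvIsLet c then
      (sub ++ ((c :: cs').takeWhile pvIsLet).map pvS) :: pvBGo ((c :: cs').dropWhile pvIsLet)
    else
      (if sub.isEmpty then [] else [sub]) ++ pvBGo (c :: cs')

theorem pvPref_nil (cs : List Char) : pvPref [] cs = pvBGo cs := by
  cases cs with
  | nil => simp [pvPref, pvBGo]
  | cons c cs' =>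
    simp only [pvPref, List.isEmpty_nil]
    by_cases h : pvIsLet c = true <;> simp [pvBGo, h]

theorem pvPref_push (sub : List String) (c : Char) (cs : List Char) (h : pvIsLet c = true) :
    pvPref sub (c :: cs) = pvPref (sub ++ [pvS c]) cs := by
  cases cs with
  | nil => simp [pvPref, h, List.takeWhile, List.dropWhile, pvBGo]
  | cons d ds =>
    by_cases hd : pvIsLet d = true <;>
      simp [pvPref, h, hd, List.takeWhile, List.dropWhile]

theorem pvKey (cs : List Char) : ∀ (out : List (List String)) (sub : List String),
    (let r := cs.foldl pvAStep (out, sub);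
     if r.2.isEmpty then r.1 else r.1 ++ [r.2]) = out ++ pvPref sub cs := by
  induction cs with
  | nil =>
    intro out sub
    cases sub <;> simp [pvPref]
  | cons c cs' ih =>
    intro out sub
    by_cases h : pvIsLet c = true
    · simp only [List.foldl_cons, pvAStep, h, if_pos]
      rw [ih out (sub ++ [pvS c]), pvPref_push sub c cs' h]
    · cases sub with
      | nil =>
        rw [List.foldl_cons, show (pvAStep (out, []) c) = (out ++ [[pvS c]], []) by
          simp [pvAStep, h]]
        rw [ih (out ++ [[pvS c]]) [], pvPref_nil]
        simp [pvPref, h, pvBGo]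
      | cons s ss =>
        rw [List.foldl_cons, show (pvAStep (out, s :: ss) c) = (out ++ [s :: ss] ++ [[pvS c]], []) by
          simp [pvAStep, h]]
        rw [ih (out ++ [s :: ss] ++ [[pvS c]]) [], pvPref_nil]
        simp [pvPref, h, pvBGo]

-- ===== VERDICT (by name: the statement is the Claim_ definition above) =====
theorem split_in_parts_spec : Claim_equal_split_in_parts := by
  intro sentence _
  unfold Spec_split_in_parts split_in_parts split_in_parts_alt
  rw [pvKey sentence.toList [] []]
  simp [pvPref_nil]
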